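-- pv_equiv track=rewrite | github.com/KengAcethylene/mega-be-assignments | algo/solve.py | solve
-- ===== SOURCE A (Python) =====
-- from collections import defaultdict
--
-- def solve(wordList, target):
--     word_list = defaultdict(int)
--     for word in wordList:
--         word_list[word] += 1
--
--     for idx in range(len(target)):
--         first, second = (target[:idx], target[idx:])
--         if word_list[first] > 0:
--             word_list[first] -= 1
--             if word_list[second] > 0:
--                 return (first, second)
--             word_list[first] += 1
--     else:
--         return None
-- ===== SOURCE B (Python) =====
-- def solve(wordList, target):
--     cnt = {}
--     for w in wordList:
--         cnt[w] = cnt.get(w, 0) + 1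
--     n = len(target)
--     best = None
--     for w in wordList:
--         k = len(w)
--         if k < n and target.startswith(w):
--             rest = target[k:]
--             need = 2 if rest == w else 1
--             if cnt.get(rest, 0) >= need and (best is None or k < best):
--                 best = k
--     if best is None:
--         return None
--     return (target[:best], target[best:])
-- ===== Notes on version B (the rewrite author's own statement) =====
-- stated objective: faster
-- what changed: A scans every split index of the target, slicing out both halves and testing them against a temporarily decremented word multiset; B builds the word counter once and instead makes a single pass over the word list, keeping the minimal length of a word that is a proper prefix of the target whose remainder is also available, so the per-index slicing scan over the target disappears.
import Mathlib
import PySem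

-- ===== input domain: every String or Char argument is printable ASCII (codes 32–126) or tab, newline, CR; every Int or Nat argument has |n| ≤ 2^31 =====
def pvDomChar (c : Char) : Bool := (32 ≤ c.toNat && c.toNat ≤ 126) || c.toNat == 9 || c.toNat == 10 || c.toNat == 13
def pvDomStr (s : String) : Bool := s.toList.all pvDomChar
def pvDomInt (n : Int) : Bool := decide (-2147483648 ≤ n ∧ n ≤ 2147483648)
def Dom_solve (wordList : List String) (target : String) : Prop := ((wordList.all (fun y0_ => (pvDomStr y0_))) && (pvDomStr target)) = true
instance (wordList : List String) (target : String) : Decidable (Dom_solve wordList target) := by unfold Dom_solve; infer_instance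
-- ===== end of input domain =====

-- B replaces A's scan over all split positions of the target (with its temporary count decrement)
-- by a single pass over the word list keeping the minimal usable prefix length; return values agree everywhere.

-- ===== PORT A =====
-- for idx in range(len(target)): ... (the counting dict is threaded through exactly as Python mutates it)
def solveLoopA (target : String) (d : PySem.Dict String Int) : List Int → Option (String × String)
  | [] => none
  | idx :: rest =>
    let first := PySem.Str.slice target none (some idx)
    let second := PySem.Str.slice target (some idx) none
    if 0 < d.getD first 0 then
      let d1 := d.insert first (d.getD first 0 - 1)      -- word_list[first] -= 1
      if 0 < d1.getD second 0 then some (first, second)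
      else solveLoopA target (d1.insert first (d1.getD first 0 + 1)) rest   -- word_list[first] += 1
    else solveLoopA target d rest

def solve (wordList : List String) (target : String) : Option (String × String) :=
  let word_list := wordList.foldl (fun d w => d.modify w 0 (· + 1)) PySem.Dict.empty  -- defaultdict(int) counting
  solveLoopA target word_list (PySem.List.pyRange 0 (PySem.Str.len target) 1)

-- ===== PORT B =====
def solve_alt (wordList : List String) (target : String) : Option (String × String) :=
  let cnt := wordList.foldl (fun d w => d.insert w (d.getD w 0 + 1)) PySem.Dict.empty
  let n := PySem.Str.len target
  let best := wordList.foldl (fun best w =>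
      let k := PySem.Str.len w
      if k < n ∧ PySem.Str.startswith target w then
        let rest := PySem.Str.slice target (some k) none
        let need : Int := if rest = w then 2 else 1
        if need ≤ cnt.getD rest 0 then
          match best with
          | none => some k
          | some b => if k < b then some k else best
        else best
      else best) none
  match best with
  | none => none
  | some b => some (PySem.Str.slice target none (some b), PySem.Str.slice target (some b) none)

-- ===== PRECONDITION & SPEC =====
def Spec_solve (wordList : List String) (target : String) (out : Option (String × String)) : Prop := out = solve_alt wordList target
instance (wordList : List String) (target : String) (out : Option (String × String)) : Decidable (Spec_solve wordList target out) := by unfold Spec_solve; infer_instance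

-- ===== CLAIM (what is proved, stated in full; the proofs are below) =====
def Claim_equal_solve : Prop := ∀ (wordList : List String) (target : String), Dom_solve wordList target → Spec_solve wordList target (solve wordList target)

-- ===== LEMMAS AND PROOFS =====

-- the two halves of a split at i
def pvPre (target : String) (i : Int) : String := PySem.Str.slice target none (some i)
def pvSuf (target : String) (i : Int) : String := PySem.Str.slice target (some i) none

-- A's success condition at split index i, phrased via multiset counts
def pvGood (wl : List String) (target : String) (i : Int) : Bool :=
  decide (0 < wl.count (pvPre target i)) &&
  decide (0 < (if pvSuf target i = pvPre target i
               then (wl.count (pvPre target i) : Int) - 1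
               else (wl.count (pvSuf target i) : Int)))

-- B's success condition for a word w
def pvQ (wl : List String) (target : String) (w : String) : Bool :=
  decide (PySem.Str.len w < PySem.Str.len target) && PySem.Str.startswith target w &&
  decide ((if pvSuf target (PySem.Str.len w) = w then (2:Int) else 1) ≤ (wl.count (pvSuf target (PySem.Str.len w)) : Int))

-- B's fold step, with the counter dict already replaced by counts
def pvStep (wl : List String) (target : String) (best : Option Int) (w : String) : Option Int :=
  let k := PySem.Str.len w
  if k < PySem.Str.len target ∧ PySem.Str.startswith target w then
    let rest := PySem.Str.slice target (some k) none
    let need : Int := if rest = w then 2 else 1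
    if need ≤ (wl.count rest : Int) then
      match best with
      | none => some k
      | some b => if k < b then some k else best
    else best
  else best

lemma loopA_char (wl : List String) (t : String) (d : PySem.Dict String Int)
    (hd : ∀ w, d.getD w 0 = (wl.count w : Int)) (idxs : List Int) :
    solveLoopA t d idxs = (idxs.find? (pvGood wl t)).map (fun i => (pvPre t i, pvSuf t i)) := by
  induction idxs generalizing d with
  | nil => simp [solveLoopA]
  | cons idx rest ih =>
    rw [solveLoopA]
    have hfst : PySem.Str.slice t none (some idx) = pvPre t idx := rfl
    have hsnd : PySem.Str.slice t (some idx) none = pvSuf t idx := rfl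
    simp only [hfst, hsnd, hd]
    by_cases h1 : 0 < (wl.count (pvPre t idx) : Int)
    · rw [if_pos h1]
      have hsec : ((d.insert (pvPre t idx) ((wl.count (pvPre t idx) : Int) - 1)).getD (pvSuf t idx) 0)
          = (if pvSuf t idx = pvPre t idx then (wl.count (pvPre t idx) : Int) - 1
             else (wl.count (pvSuf t idx) : Int)) := by
        rw [PySem.Dict.getD_insert]
        split_ifs
        · rfl
        · exact hd _
      rw [hsec]
      by_cases h2 : 0 < (if pvSuf t idx = pvPre t idx then (wl.count (pvPre t idx) : Int) - 1
          else (wl.count (pvSuf t idx) : Int))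
      · rw [if_pos h2]
        have hg : pvGood wl t idx = true := by
          unfold pvGood; simp only [Bool.and_eq_true, decide_eq_true_eq]; exact ⟨by exact_mod_cast h1, h2⟩
        simp [hg]
      · rw [if_neg h2]
        have hg : pvGood wl t idx = false := by
          unfold pvGood
          simp only [Bool.and_eq_false_iff, decide_eq_false_iff_not]
          right; exact h2
        rw [ih]
        · simp [hg]
        · intro w
          simp only [PySem.Dict.getD_insert]
          by_cases hw : w = pvPre t idx
          · subst hw; simp
          · simp only [if_neg hw]; exact hd w
    · rw [if_neg h1]
      have hg : pvGood wl t idx = false := by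
        unfold pvGood
        simp only [Bool.and_eq_false_iff, decide_eq_false_iff_not]
        left; intro h; exact h1 (by exact_mod_cast h)
      rw [ih d hd]
      simp [hg]

lemma solve_eq_find (wl : List String) (t : String) :
    solve wl t = ((PySem.List.pyRange 0 (PySem.Str.len t) 1).find? (pvGood wl t)).map
      (fun i => (pvPre t i, pvSuf t i)) := by
  unfold solve
  exact loopA_char wl t _ (fun w => by
    simp [PySem.Dict.getD_foldl_modify_add_one]) _

lemma alt_eq_fold (wl : List String) (t : String) :
    solve_alt wl t = match wl.foldl (pvStep wl t) none with
      | none => none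
      | some b => some (pvPre t b, pvSuf t b) := by
  have hfun : (fun (best : Option Int) (w : String) =>
      let k := PySem.Str.len w
      if k < PySem.Str.len t ∧ PySem.Str.startswith t w then
        let rest := PySem.Str.slice t (some k) none
        let need : Int := if rest = w then 2 else 1
        if need ≤ (wl.foldl (fun d w => d.insert w (d.getD w 0 + 1)) PySem.Dict.empty).getD rest 0 then
          match best with
          | none => some k
          | some b => if k < b then some k else best
        else best
      else best) = pvStep wl t := by
    funext best w
    unfold pvStep
    simp [PySem.Dict.getD_foldl_insert_add_one]
  show (match wl.foldl _ none with
      | none => none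
      | some b => some (PySem.Str.slice t none (some b), PySem.Str.slice t (some b) none)) = _
  rw [hfun]
  rfl

lemma find?_pyRange_some {p : Int → Bool} {a b k : Int}
    (h : (PySem.List.pyRange a b 1).find? p = some k) :
    a ≤ k ∧ k < b ∧ p k = true ∧ ∀ j, a ≤ j → j < k → p j = false := by
  induction hfuel : (b - a).toNat generalizing a with
  | zero =>
    rw [PySem.List.pyRange_one_eq_nil (by omega)] at h
    simp at h
  | succ n ih =>
    have hab : a < b := by omega
    rw [PySem.List.pyRange_one_cons hab] at h
    by_cases hp : p a = true
    · rw [List.find?_cons_of_pos hp] at h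
      obtain rfl : a = k := by simpa using h
      exact ⟨le_refl _, hab, hp, fun j h1 h2 => absurd (lt_of_le_of_lt h1 h2) (lt_irrefl _)⟩
    · rw [List.find?_cons_of_neg (by simpa using hp)] at h
      obtain ⟨h1, h2, h3, h4⟩ := ih h (by omega)
      refine ⟨by omega, h2, h3, fun j hj1 hj2 => ?_⟩
      by_cases hja : j = a
      · subst hja; simpa using hp
      · exact h4 j (by omega) hj2

-- pvStep as a decision on pvQ
lemma pvStep_eq (wl : List String) (t : String) (b : Option Int) (w : String) :
    pvStep wl t b w = if pvQ wl t w then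
        (match b with
         | none => some (PySem.Str.len w)
         | some b0 => if PySem.Str.len w < b0 then some (PySem.Str.len w) else some b0)
      else b := by
  unfold pvStep pvQ pvSuf
  by_cases h1 : PySem.Str.len w < PySem.Str.len t ∧ PySem.Str.startswith t w = true
  · by_cases h2 : (if PySem.Str.slice t (some (PySem.Str.len w)) none = w then (2:Int) else 1) ≤
        (wl.count (PySem.Str.slice t (some (PySem.Str.len w)) none) : Int)
    · rw [if_pos h1, if_pos h2,
        if_pos (show _ = true by simp only [Bool.and_eq_true, decide_eq_true_eq]; exact ⟨⟨h1.1, h1.2⟩, h2⟩)]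
      cases b <;> rfl
    · rw [if_pos h1, if_neg h2,
        if_neg (show ¬ _ = true by simp only [Bool.and_eq_true, decide_eq_true_eq]; rintro ⟨_, hc⟩; exact h2 hc)]
  · rw [if_neg h1,
      if_neg (show ¬ _ = true by simp only [Bool.and_eq_true, decide_eq_true_eq]; rintro ⟨⟨hc1, hc2⟩, _⟩; exact h1 ⟨hc1, hc2⟩)]

lemma pvStep_none_q (wl : List String) (t : String) (w : String) (hq : pvQ wl t w = true) :
    pvStep wl t none w = some (PySem.Str.len w) := by rw [pvStep_eq, if_pos hq]

lemma pvStep_some_q (wl : List String) (t : String) (w : String) (b0 : Int) (hq : pvQ wl t w = true) :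
    pvStep wl t (some b0) w = if PySem.Str.len w < b0 then some (PySem.Str.len w) else some b0 := by
  rw [pvStep_eq, if_pos hq]

lemma pvStep_nq (wl : List String) (t : String) (b : Option Int) (w : String) (hq : ¬ pvQ wl t w = true) :
    pvStep wl t b w = b := by rw [pvStep_eq, if_neg hq]

lemma foldStep_none (wl : List String) (t : String) (l : List String) (b : Option Int)
    (h : l.foldl (pvStep wl t) b = none) : b = none ∧ ∀ w ∈ l, ¬ pvQ wl t w := by
  induction l generalizing b with
  | nil => exact ⟨by simpa using h, by simp⟩
  | cons w l ih =>
    rw [List.foldl_cons] at h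
    obtain ⟨hb', hall⟩ := ih (pvStep wl t b w) h
    by_cases hq : pvQ wl t w
    · exfalso
      cases b with
      | none => rw [pvStep_none_q wl t w hq] at hb'; simp at hb'
      | some b0 =>
        rw [pvStep_some_q wl t w b0 hq] at hb'
        split_ifs at hb'
    · rw [pvStep_nq wl t b w hq] at hb'
      refine ⟨hb', fun w' hw' => ?_⟩
      rcases List.mem_cons.mp hw' with rfl | hw'
      · exact hq
      · exact hall w' hw'

lemma foldStep_some (wl : List String) (t : String) (l : List String) (b : Option Int) (m : Int)
    (h : l.foldl (pvStep wl t) b = some m) :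
    (b = some m ∨ ∃ w ∈ l, pvQ wl t w ∧ PySem.Str.len w = m) ∧
    (∀ b0, b = some b0 → m ≤ b0) ∧ (∀ w ∈ l, pvQ wl t w → m ≤ PySem.Str.len w) := by
  induction l generalizing b with
  | nil => exact ⟨Or.inl (by simpa using h), fun b0 hb0 => by simp_all, by simp⟩
  | cons w l ih =>
    rw [List.foldl_cons] at h
    obtain ⟨h1, h2, h3⟩ := ih (pvStep wl t b w) h
    by_cases hq : pvQ wl t w
    · cases b with
      | none =>
        rw [pvStep_none_q wl t w hq] at h1 h2
        refine ⟨?_, fun b0 hb0 => by simp at hb0, fun w' hw' hq' => ?_⟩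
        · rcases h1 with h1 | ⟨w', hw', hq', hl⟩
          · exact Or.inr ⟨w, List.mem_cons_self, hq, by simpa using h1⟩
          · exact Or.inr ⟨w', List.mem_cons_of_mem _ hw', hq', hl⟩
        · rcases List.mem_cons.mp hw' with rfl | hw'
          · exact h2 _ rfl
          · exact h3 w' hw' hq'
      | some b0 =>
        rw [pvStep_some_q wl t w b0 hq] at h1 h2
        by_cases hlt : PySem.Str.len w < b0
        · rw [if_pos hlt] at h1 h2
          refine ⟨?_, fun b1 hb1 => ?_, fun w' hw' hq' => ?_⟩
          · rcases h1 with h1 | ⟨w', hw', hq', hl⟩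
            · exact Or.inr ⟨w, List.mem_cons_self, hq, by simpa using h1⟩
            · exact Or.inr ⟨w', List.mem_cons_of_mem _ hw', hq', hl⟩
          · obtain rfl : b0 = b1 := by simpa using hb1
            have := h2 (PySem.Str.len w) rfl
            omega
          · rcases List.mem_cons.mp hw' with rfl | hw'
            · exact h2 _ rfl
            · exact h3 w' hw' hq'
        · rw [if_neg hlt] at h1 h2
          refine ⟨?_, fun b1 hb1 => ?_, fun w' hw' hq' => ?_⟩
          · rcases h1 with h1 | ⟨w', hw', hq', hl⟩
            · exact Or.inl h1
            · exact Or.inr ⟨w', List.mem_cons_of_mem _ hw', hq', hl⟩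
          · obtain rfl : b0 = b1 := by simpa using hb1
            exact h2 _ rfl
          · rcases List.mem_cons.mp hw' with rfl | hw'
            · have := h2 b0 rfl; omega
            · exact h3 w' hw' hq'
    · rw [pvStep_nq wl t b w hq] at h1 h2
      refine ⟨?_, h2, fun w' hw' hq' => ?_⟩
      · rcases h1 with h1 | ⟨w', hw', hq', hl⟩
        · exact Or.inl h1
        · exact Or.inr ⟨w', List.mem_cons_of_mem _ hw', hq', hl⟩
      · rcases List.mem_cons.mp hw' with rfl | hw'
        · exact absurd hq' hq
        · exact h3 w' hw' hq'

lemma pvPre_toList (t : String) (k : Int) (h0 : 0 ≤ k) :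
    (pvPre t k).toList = t.toList.take k.toNat := by
  unfold pvPre
  rw [PySem.Str.toList_slice, PySem.Chars.slice_eq_listSlice, PySem.List.slice_to _ h0]

lemma pvPre_len (t : String) (k : Int) (h0 : 0 ≤ k) (hn : k < PySem.Str.len t) :
    PySem.Str.len (pvPre t k) = k := by
  rw [PySem.Str.len_eq] at hn ⊢
  rw [pvPre_toList t k h0, List.length_take]
  push_cast
  omega

lemma startswith_pvPre (t : String) (k : Int) (h0 : 0 ≤ k) :
    PySem.Str.startswith t (pvPre t k) = true := by
  rw [PySem.Str.startswith_eq, pvPre_toList t k h0]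
  exact (PySem.Chars.startswith_iff _ _).mpr (List.take_prefix _ _)

lemma bridge_A_to_B (wl : List String) (t : String) (k : Int) (h0 : 0 ≤ k)
    (hn : k < PySem.Str.len t) (hg : pvGood wl t k = true) :
    ∃ w ∈ wl, pvQ wl t w ∧ PySem.Str.len w = k := by
  unfold pvGood at hg
  simp only [Bool.and_eq_true, decide_eq_true_eq] at hg
  obtain ⟨hg1, hg2⟩ := hg
  refine ⟨pvPre t k, List.count_pos_iff.mp hg1, ?_, pvPre_len t k h0 hn⟩
  unfold pvQ
  rw [pvPre_len t k h0 hn]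
  simp only [Bool.and_eq_true, decide_eq_true_eq]
  refine ⟨⟨hn, startswith_pvPre t k h0⟩, ?_⟩
  by_cases heq : pvSuf t k = pvPre t k
  · rw [if_pos heq, heq]
    rw [if_pos heq] at hg2
    omega
  · rw [if_neg heq]
    rw [if_neg heq] at hg2
    omega

lemma bridge_B_to_A (wl : List String) (t : String) (w : String) (hw : w ∈ wl)
    (hq : pvQ wl t w) :
    0 ≤ PySem.Str.len w ∧ PySem.Str.len w < PySem.Str.len t ∧ pvGood wl t (PySem.Str.len w) = true := by
  unfold pvQ at hq
  simp only [Bool.and_eq_true, decide_eq_true_eq] at hq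
  obtain ⟨⟨hq1, hq2⟩, hq3⟩ := hq
  have h0 : 0 ≤ PySem.Str.len w := by rw [PySem.Str.len_eq]; exact Int.natCast_nonneg _
  have hpre : pvPre t (PySem.Str.len w) = w := by
    apply String.toList_inj.mp
    rw [pvPre_toList _ _ h0]
    have hp : w.toList <+: t.toList :=
      (PySem.Chars.startswith_iff t.toList w.toList).mp (by rw [← PySem.Str.startswith_eq]; exact hq2)
    have htake := List.prefix_iff_eq_take.mp hp
    rw [PySem.Str.len_eq, Int.toNat_natCast]
    exact htake.symm
  refine ⟨h0, hq1, ?_⟩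
  unfold pvGood
  simp only [Bool.and_eq_true, decide_eq_true_eq]
  rw [hpre]
  refine ⟨List.count_pos_iff.mpr hw, ?_⟩
  by_cases heq : pvSuf t (PySem.Str.len w) = w
  · rw [if_pos heq]
    rw [if_pos heq, heq] at hq3
    omega
  · rw [if_neg heq]
    rw [if_neg heq] at hq3
    omega

-- ===== VERDICT (by name: the statement is the Claim_ definition above) =====
theorem solve_spec : Claim_equal_solve := by
  intro wl t _
  unfold Spec_solve
  rw [solve_eq_find, alt_eq_fold]
  rcases hA : (PySem.List.pyRange 0 (PySem.Str.len t) 1).find? (pvGood wl t) with _ | k <;>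
    rcases hB : wl.foldl (pvStep wl t) none with _ | m
  · simp
  · obtain ⟨h1, _, h3⟩ := foldStep_some wl t wl none m hB
    rcases h1 with h1 | ⟨w, hw, hq, hlen⟩
    · exact absurd h1 (by simp)
    · obtain ⟨h0, hn, hg⟩ := bridge_B_to_A wl t w hw hq
      rw [hlen] at h0 hn hg
      have := List.find?_eq_none.mp hA m (by rw [PySem.List.mem_pyRange_one]; exact ⟨h0, hn⟩)
      exact absurd hg this
  · obtain ⟨h0, hn, hg, _⟩ := find?_pyRange_some hA
    obtain ⟨w, hw, hq, hlen⟩ := bridge_A_to_B wl t k h0 hn hg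
    obtain ⟨_, h2⟩ := foldStep_none wl t wl none hB
    exact absurd hq (h2 w hw)
  · obtain ⟨h0, hn, hg, hmin⟩ := find?_pyRange_some hA
    obtain ⟨h1, _, h3⟩ := foldStep_some wl t wl none m hB
    have hkm : k = m := by
      rcases h1 with h1 | ⟨w, hw, hq, hlen⟩
      · exact absurd h1 (by simp)
      · obtain ⟨hm0, hmn, hmg⟩ := bridge_B_to_A wl t w hw hq
        rw [hlen] at hm0 hmn hmg
        obtain ⟨w', hw', hq', hlen'⟩ := bridge_A_to_B wl t k h0 hn hg
        have hmk : m ≤ k := by rw [← hlen']; exact h3 w' hw' hq'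
        by_contra hne
        have : m < k := by omega
        exact absurd hmg (by simpa using hmin m hm0 this)
    simp [hkm]
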